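-- pv_equiv track=rewrite | github.com/Ookamiko/AdventOfCode | year_2015/day/day11.py | IncrementPassword
-- ===== SOURCE A (Python) =====
-- def IncrementPassword(password):
-- 	end = False
-- 	i = len(password) - 1
-- 	while not(end):
-- 		if password[i] != 'z':
-- 			password[i] = chr(ord(password[i]) + 1)
-- 			end = True
-- 		else:
-- 			password[i] = 'a'
-- 			i -= 1
--
-- 	if 'i' in password:
-- 		index = password.index('i')
-- 		password[index] = 'j'
-- 		for i in range(index + 1, len(password)):
-- 			password[i] = 'a'
--
-- 	if 'l' in password:
-- 		index = password.index('l')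
-- 		password[index] = 'm'
-- 		for i in range(index + 1, len(password)):
-- 			password[i] = 'a'
--
-- 	if 'o' in password:
-- 		index = password.index('o')
-- 		password[index] = 'p'
-- 		for i in range(index + 1, len(password)):
-- 			password[i] = 'a'
--
-- 	return password
-- ===== SOURCE B (Python) =====
-- def IncrementPassword(password):
-- 	# One bounded right-to-left carry pass, then a single left-to-right scan
-- 	# that fixes the leftmost forbidden letter; mutates the list in place.
-- 	j = len(password) - 1
-- 	while j >= 0 and password[j] == 'z':
-- 		password[j] = 'a'
-- 		j -= 1
-- 	if j >= 0:
-- 		password[j] = chr(ord(password[j]) + 1)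
--
-- 	bump = {'i': 'j', 'l': 'm', 'o': 'p'}
-- 	for k, ch in enumerate(password):
-- 		r = bump.get(ch)
-- 		if r is not None:
-- 			password[k] = r
-- 			password[k + 1:] = ['a'] * (len(password) - k - 1)
-- 			break
-- 	return password
-- ===== Notes on version B (the rewrite author's own statement) =====
-- stated objective: simpler
-- what changed: The three sequential find-index/overwrite passes for 'i', 'l', 'o' are replaced by a single left-to-right scan that bumps the leftmost forbidden letter and fills everything after it with 'a', and the carry loop becomes a bounded while that stops at the left edge instead of wrapping to a negative index.
-- intended difference: On nonempty passwords consisting entirely of 'z', A's index wraps to -1 and it returns ['a',...,'a','b'], while B does the standard odometer wrap and returns all 'a'; the wrap to -1 and re-increment of the last cell is an accident of A's while loop, so B's value is the intended one. — e.g. on IncrementPassword(["z"]): A returns ["b"], B returns ["a"]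
import Mathlib
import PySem

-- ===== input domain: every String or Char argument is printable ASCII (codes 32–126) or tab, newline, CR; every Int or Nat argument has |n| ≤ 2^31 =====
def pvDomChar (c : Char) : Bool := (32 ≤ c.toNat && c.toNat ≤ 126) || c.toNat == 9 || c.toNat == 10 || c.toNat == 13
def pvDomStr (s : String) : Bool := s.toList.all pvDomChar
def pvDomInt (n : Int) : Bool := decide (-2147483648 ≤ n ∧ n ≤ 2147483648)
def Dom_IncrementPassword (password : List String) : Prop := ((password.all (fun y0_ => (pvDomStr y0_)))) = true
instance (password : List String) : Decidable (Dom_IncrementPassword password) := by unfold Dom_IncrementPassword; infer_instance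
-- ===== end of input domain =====

-- B replaces A's three sequential forbidden-letter passes by one left-to-right scan and bounds
-- the carry loop at the left edge (objective: simpler). Both Pythons mutate the list in place;
-- the equivalence proved here is about the returned value.

-- chr(ord(s) + 1), shared by both ports: exact on single-character strings (which is all
-- either program ever applies it to on inputs admitted by Pre_)
def succS (s : String) : String :=
  match s.toList with
  | [c] => String.ofList [Char.ofNat (c.toNat + 1)]
  | _ => s

-- ===== PORT A =====
-- A's while loop: i walks down (possibly to -1, where Python indexing wraps to the end);
-- fuel = len+1 only makes the recursion total — it is never exhausted on inputs where A returns
def incLoopA : Nat → List String → Int → List String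
  | 0, pw, _ => pw
  | f + 1, pw, i =>
    match PySem.List.pyGet? pw i with
    | none => pw
    | some c =>
      if c ≠ "z" then PySem.List.pySetD pw i (succS c)
      else incLoopA f (PySem.List.pySetD pw i "a") (i - 1)

-- one of A's three identical blocks: if c in pw: k = pw.index(c); pw[k] = r; fill the rest with 'a'
def passA (c r : String) (pw : List String) : List String :=
  if c ∈ pw then
    match PySem.List.index? pw c with
    | some k =>
      let pw1 := PySem.List.pySetD pw (k : Int) r
      (PySem.List.pyRange ((k : Int) + 1) (PySem.List.len pw1) 1).foldl
        (fun acc j => PySem.List.pySetD acc j "a") pw1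
    | none => pw
  else pw

def IncrementPassword (password : List String) : List String :=
  let pw := incLoopA (password.length + 1) password (PySem.List.len password - 1)
  passA "o" "p" (passA "l" "m" (passA "i" "j" pw))

-- ===== PORT B =====
-- B's while loop: j counts down while pw[j] == 'z'; argument is j+1, returns (list, j if j ≥ 0)
def incLoopB : Nat → List String → List String × Option Nat
  | 0, pw => (pw, none)
  | j + 1, pw =>
    if PySem.List.pyGetD pw (j : Int) "" = "z"
    then incLoopB j (PySem.List.pySetD pw (j : Int) "a")
    else (pw, some j)

def bumpB : PySem.Dict String String :=
  PySem.Dict.ofList [("i", "j"), ("l", "m"), ("o", "p")]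

-- B's scan: bump the first forbidden letter, slice-assign 'a's after it, break
def scanFixB : List String → List String
  | [] => []
  | ch :: t =>
    match PySem.Dict.get? bumpB ch with
    | some r => r :: List.replicate t.length "a"
    | none => ch :: scanFixB t

def IncrementPassword_alt (password : List String) : List String :=
  let p := incLoopB password.length password
  let pw1 :=
    match p.2 with
    | some j => PySem.List.pySetD p.1 (j : Int) (succS (PySem.List.pyGetD p.1 (j : Int) ""))
    | none => p.1
  scanFixB pw1

-- ===== PRECONDITION & SPEC =====
-- Pre_ excludes exactly the inputs on which A raises: the empty list (IndexError at
-- password[-1]) and lists whose first non-"z" element from the end is not a single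
-- character (TypeError at ord).
def Pre_IncrementPassword (password : List String) : Prop :=
  password ≠ [] ∧
  ((password.reverse.dropWhile (fun t => t == "z")).head?.all
      (fun s => s.toList.length == 1)) = true

instance (password : List String) : Decidable (Pre_IncrementPassword password) := by
  unfold Pre_IncrementPassword; infer_instance

def pvWitness_IncrementPassword : List String := ["a", "b"]

-- On nonempty all-'z' passwords A's index wraps to -1 and it returns ['a',…,'a','b'];
-- B does the standard odometer wrap and returns all 'a', the intended value.
def D_IncrementPassword (password : List String) : Prop :=
  password ≠ [] ∧ ∀ s ∈ password, s = "z"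

instance (password : List String) : Decidable (D_IncrementPassword password) := by
  unfold D_IncrementPassword; infer_instance

def Spec_IncrementPassword (password : List String) (out : List String) : Prop :=
  ¬ D_IncrementPassword password → out = IncrementPassword_alt password

instance (password : List String) (out : List String) : Decidable (Spec_IncrementPassword password out) := by
  unfold Spec_IncrementPassword; infer_instance

def pvDiffWitness_IncrementPassword : List String := ["z"]
def pvDiffWitnessOut_IncrementPassword : (List String) × (List String) := (["b"], ["a"])

-- ===== CLAIM (what is proved, stated in full; the proofs are below) =====
def Claim_unchanged_IncrementPassword : Prop := ∀ (password : List String), Dom_IncrementPassword password → Pre_IncrementPassword password → Spec_IncrementPassword password (IncrementPassword password)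
def Claim_changed_IncrementPassword : Prop := Dom_IncrementPassword (pvDiffWitness_IncrementPassword) ∧ Pre_IncrementPassword (pvDiffWitness_IncrementPassword) ∧ D_IncrementPassword (pvDiffWitness_IncrementPassword) ∧ IncrementPassword (pvDiffWitness_IncrementPassword) = pvDiffWitnessOut_IncrementPassword.1 ∧ IncrementPassword_alt (pvDiffWitness_IncrementPassword) = pvDiffWitnessOut_IncrementPassword.2 ∧ pvDiffWitnessOut_IncrementPassword.1 ≠ pvDiffWitnessOut_IncrementPassword.2
def Claim_exact_IncrementPassword : Prop := ∀ (password : List String), Dom_IncrementPassword password → Pre_IncrementPassword password → D_IncrementPassword password → IncrementPassword password ≠ IncrementPassword_alt password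

-- ===== LEMMAS AND PROOFS =====

lemma set_append_len (u : List String) (x y : String) (v : List String) :
    (u ++ x :: v).set u.length y = u ++ y :: v := by
  induction u with
  | nil => rfl
  | cons a u ih => simp [List.set, ih]

lemma fill_foldl (v : List String) : ∀ (u : List String),
    (PySem.List.pyRange (u.length : Int) ((u.length : Int) + (v.length : Int)) 1).foldl
        (fun acc j => PySem.List.pySetD acc j "a") (u ++ v)
      = u ++ List.replicate v.length "a" := by
  induction v with
  | nil => intro u; simp [PySem.List.pyRange_one_eq_nil]
  | cons x v ih =>
    intro u
    rw [PySem.List.pyRange_one_cons (by simp)]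
    simp only [List.foldl_cons]
    have h1 : PySem.List.pySetD (u ++ x :: v) (u.length : Int) "a" = (u ++ ["a"]) ++ v := by
      rw [PySem.List.pySetD_natCast, set_append_len]; simp
    rw [h1]
    have h2 := ih (u ++ ["a"])
    have e1 : ((u.length : Int) + 1) = (((u ++ ["a"]).length : Nat) : Int) := by simp
    have e2 : (u.length : Int) + ((x :: v).length : Int) = (((u ++ ["a"]).length : Nat) : Int) + (v.length : Int) := by
      simp; ring
    rw [e1, e2, h2]
    simp [List.replicate_succ]

lemma passA_closed (c r : String) (pw : List String) (k : Nat)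
    (hk : PySem.List.index? pw c = some k) :
    passA c r pw = pw.take k ++ r :: List.replicate (pw.length - (k + 1)) "a" := by
  obtain ⟨pre, suf, hpw, hlen, -⟩ := (PySem.List.index?_eq_some_iff pw c k).1 hk
  have hmem : c ∈ pw := by rw [hpw]; simp
  subst hpw hlen
  simp only [passA, if_pos hmem, hk]
  have hset : PySem.List.pySetD (pre ++ c :: suf) ((pre.length : Nat) : Int) r
      = (pre ++ [r]) ++ suf := by
    rw [PySem.List.pySetD_natCast, set_append_len]; simp
  simp only [hset]
  have hlen1 : PySem.List.len ((pre ++ [r]) ++ suf) = ((pre ++ [r]).length : Int) + (suf.length : Int) := by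
    simp [PySem.List.len_eq]; ring
  have harg : ((pre.length : Nat) : Int) + 1 = (((pre ++ [r]).length : Nat) : Int) := by simp
  rw [hlen1, harg, fill_foldl suf (pre ++ [r])]
  have : pre.length + (suf.length + 1) - (pre.length + 1) = suf.length := by omega
  simp [List.take_append, this]

lemma passA_not_mem (c r : String) (pw : List String) (h : c ∉ pw) :
    passA c r pw = pw := by
  simp [passA, h]

lemma passA_cons_ne (c r x : String) (t : List String) (hx : x ≠ c) :
    passA c r (x :: t) = x :: passA c r t := by
  by_cases hm : c ∈ t
  · obtain ⟨k, hk⟩ := Option.isSome_iff_exists.1 ((PySem.List.index?_isSome_iff t c).2 hm)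
    have hk' : PySem.List.index? (x :: t) c = some (k + 1) := by
      rw [PySem.List.index?_cons_of_ne t hx, hk]; rfl
    rw [passA_closed c r t k hk, passA_closed c r (x :: t) (k + 1) hk']
    simp [List.take_cons]
  · have hm' : c ∉ x :: t := by simp only [List.mem_cons, not_or]; exact ⟨fun h => hx h.symm, hm⟩
    rw [passA_not_mem _ _ _ hm, passA_not_mem _ _ _ hm']

lemma passA_length (c r : String) (pw : List String) :
    (passA c r pw).length = pw.length := by
  by_cases hm : c ∈ pw
  · obtain ⟨k, hk⟩ := Option.isSome_iff_exists.1 ((PySem.List.index?_isSome_iff pw c).2 hm)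
    obtain ⟨hklt, -, -⟩ := PySem.List.getElem_of_index?_eq_some hk
    rw [passA_closed c r pw k hk]
    simp [List.length_take]
    omega
  · rw [passA_not_mem _ _ _ hm]

lemma get?_bumpB (ch : String) :
    PySem.Dict.get? bumpB ch =
      if ch = "i" then some "j" else if ch = "l" then some "m"
      else if ch = "o" then some "p" else none := by
  by_cases h1 : ch = "i"
  · subst h1; decide
  · by_cases h2 : ch = "l"
    · subst h2; decide
    · by_cases h3 : ch = "o"
      · subst h3; decide
      · have b1 : (("i" : String) == ch) = false := beq_eq_false_iff_ne.mpr (fun h => h1 h.symm)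
        have b2 : (("l" : String) == ch) = false := beq_eq_false_iff_ne.mpr (fun h => h2 h.symm)
        have b3 : (("o" : String) == ch) = false := beq_eq_false_iff_ne.mpr (fun h => h3 h.symm)
        have hb : bumpB = PySem.Dict.mk [("i", "j"), ("l", "m"), ("o", "p")] := by decide
        rw [hb, PySem.Dict.get?_mk_cons, b1, PySem.Dict.get?_mk_cons, b2,
            PySem.Dict.get?_mk_cons, b3, if_neg h1, if_neg h2, if_neg h3]
        simp [PySem.Dict.get?]

lemma mem_replicate_a (s : String) (n : Nat) (hs : s ≠ "a") : s ∉ List.replicate n "a" := by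
  simp [List.mem_replicate]; intro _ h; exact hs h

lemma passes_eq_scan (l : List String) :
    passA "o" "p" (passA "l" "m" (passA "i" "j" l)) = scanFixB l := by
  induction l with
  | nil => simp [passA_not_mem, scanFixB]
  | cons ch t ih =>
    by_cases hi : ch = "i"
    · subst hi
      have h1 : passA "i" "j" ("i" :: t) = "j" :: List.replicate t.length "a" := by
        have := passA_closed "i" "j" ("i" :: t) 0 (PySem.List.index?_cons_self _ _)
        simpa using this
      rw [h1, passA_not_mem "l" "m" _ (by
            simp only [List.mem_cons, not_or]
            exact ⟨by decide, mem_replicate_a _ _ (by decide)⟩),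
          passA_not_mem "o" "p" _ (by
            simp only [List.mem_cons, not_or]
            exact ⟨by decide, mem_replicate_a _ _ (by decide)⟩)]
      simp [scanFixB, get?_bumpB]
    · by_cases hl : ch = "l"
      · subst hl
        rw [passA_cons_ne "i" "j" "l" t (by decide)]
        have h1 : passA "l" "m" ("l" :: passA "i" "j" t) = "m" :: List.replicate (passA "i" "j" t).length "a" := by
          have := passA_closed "l" "m" ("l" :: passA "i" "j" t) 0 (PySem.List.index?_cons_self _ _)
          simpa using this
        rw [h1, passA_not_mem "o" "p" _ (by
              simp only [List.mem_cons, not_or]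
              exact ⟨by decide, mem_replicate_a _ _ (by decide)⟩)]
        simp [scanFixB, get?_bumpB, passA_length]
      · by_cases ho : ch = "o"
        · subst ho
          rw [passA_cons_ne "i" "j" "o" t (by decide),
              passA_cons_ne "l" "m" "o" (passA "i" "j" t) (by decide)]
          have h1 : passA "o" "p" ("o" :: passA "l" "m" (passA "i" "j" t))
              = "p" :: List.replicate (passA "l" "m" (passA "i" "j" t)).length "a" := by
            have := passA_closed "o" "p" ("o" :: passA "l" "m" (passA "i" "j" t)) 0 (PySem.List.index?_cons_self _ _)
            simpa using this
          rw [h1]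
          simp [scanFixB, get?_bumpB, passA_length]
        · rw [passA_cons_ne "i" "j" ch t (Ne.symm (by simpa [eq_comm] using hi)),
              passA_cons_ne "l" "m" ch (passA "i" "j" t) (by simpa [eq_comm] using hl),
              passA_cons_ne "o" "p" ch (passA "l" "m" (passA "i" "j" t)) (by simpa [eq_comm] using ho), ih]
          simp [scanFixB, get?_bumpB, hi, hl, ho]

lemma getD_append_len (u : List String) (x : String) (v : List String) (d : String) :
    (u ++ x :: v).getD u.length d = x := by
  simp [List.getD_eq_getElem?_getD, List.getElem?_append_right (le_refl u.length)]

lemma incLoopA_zblock (t : Nat) : ∀ (q f : Nat) (front : List String) (c : String),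
    c ≠ "z" → t + 1 ≤ f →
    incLoopA f (front ++ c :: (List.replicate t "z" ++ List.replicate q "a"))
      ((front.length + t : Nat) : Int)
      = front ++ succS c :: List.replicate (t + q) "a" := by
  induction t with
  | zero =>
    intro q f front c hc hf
    obtain ⟨f', rfl⟩ : ∃ f', f = f' + 1 := ⟨f - 1, by omega⟩
    rw [incLoopA]
    have hg : PySem.List.pyGet? (front ++ c :: (List.replicate 0 "z" ++ List.replicate q "a"))
        ((front.length + 0 : Nat) : Int) = some c := by
      simpa using PySem.List.pyGet?_append_length front c (List.replicate q "a")
    rw [hg]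
    simp only [if_pos hc]
    rw [PySem.List.pySetD_natCast]
    simp [set_append_len]
  | succ t ih =>
    intro q f front c hc hf
    obtain ⟨f', rfl⟩ : ∃ f', f = f' + 1 := ⟨f - 1, by omega⟩
    rw [incLoopA]
    have hsplit : front ++ c :: (List.replicate (t + 1) "z" ++ List.replicate q "a")
        = (front ++ c :: List.replicate t "z") ++ "z" :: List.replicate q "a" := by
      simp [List.replicate_succ']
    have hidx : (front.length + (t + 1) : Nat)
        = (front ++ c :: List.replicate t "z").length := by
      simp
    have hg : PySem.List.pyGet? (front ++ c :: (List.replicate (t + 1) "z" ++ List.replicate q "a"))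
        ((front.length + (t + 1) : Nat) : Int) = some "z" := by
      rw [hsplit, hidx]
      exact PySem.List.pyGet?_append_length _ _ _
    rw [hg]
    simp only [ne_eq, not_true_eq_false, if_false]
    have hset : PySem.List.pySetD (front ++ c :: (List.replicate (t + 1) "z" ++ List.replicate q "a"))
        ((front.length + (t + 1) : Nat) : Int) "a"
        = front ++ c :: (List.replicate t "z" ++ List.replicate (q + 1) "a") := by
      rw [hsplit, hidx, PySem.List.pySetD_natCast, set_append_len]
      simp [List.replicate_succ, List.replicate_succ']
    rw [hset]
    have harg : ((front.length + (t + 1) : Nat) : Int) - 1 = ((front.length + t : Nat) : Int) := by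
      push_cast; ring
    rw [harg, ih (q + 1) f' front c hc (by omega)]
    have : t + 1 + q = t + (q + 1) := by omega
    rw [this]

lemma pyGetD_append_len (u : List String) (x : String) (v : List String) (d : String) :
    PySem.List.pyGetD (u ++ x :: v) ((u.length : Nat) : Int) d = x := by
  rw [PySem.List.pyGetD_natCast, getD_append_len]

lemma incLoopB_zblock (t : Nat) : ∀ (q : Nat) (front : List String) (c : String),
    c ≠ "z" →
    incLoopB (front.length + 1 + t) (front ++ c :: (List.replicate t "z" ++ List.replicate q "a"))
      = (front ++ c :: List.replicate (t + q) "a", some front.length) := by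
  induction t with
  | zero =>
    intro q front c hc
    show incLoopB (front.length + 1) _ = _
    rw [incLoopB]
    have hg : PySem.List.pyGetD (front ++ c :: (List.replicate 0 "z" ++ List.replicate q "a"))
        ((front.length : Nat) : Int) "" = c := by
      simpa using pyGetD_append_len front c (List.replicate q "a") ""
    rw [hg, if_neg hc]
    simp
  | succ t ih =>
    intro q front c hc
    have hcnt : front.length + 1 + (t + 1) = (front.length + 1 + t) + 1 := by omega
    rw [hcnt, incLoopB]
    have hsplit : front ++ c :: (List.replicate (t + 1) "z" ++ List.replicate q "a")
        = (front ++ c :: List.replicate t "z") ++ "z" :: List.replicate q "a" := by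
      simp [List.replicate_succ']
    have hidx : (front.length + 1 + t : Nat) = (front ++ c :: List.replicate t "z").length := by
      simp; omega
    have hg : PySem.List.pyGetD (front ++ c :: (List.replicate (t + 1) "z" ++ List.replicate q "a"))
        ((front.length + 1 + t : Nat) : Int) "" = "z" := by
      rw [hsplit, hidx]; exact pyGetD_append_len _ _ _ _
    rw [hg, if_pos rfl]
    have hset : PySem.List.pySetD (front ++ c :: (List.replicate (t + 1) "z" ++ List.replicate q "a"))
        ((front.length + 1 + t : Nat) : Int) "a"
        = front ++ c :: (List.replicate t "z" ++ List.replicate (q + 1) "a") := by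
      rw [hsplit, hidx, PySem.List.pySetD_natCast, set_append_len]
      simp [List.replicate_succ, List.replicate_succ']
    rw [hset, ih (q + 1) front c hc]
    have : t + 1 + q = t + (q + 1) := by omega
    rw [this]

lemma pySetD_neg_one_append (u : List String) (x v : String) :
    PySem.List.pySetD (u ++ [x]) (-1) v = u ++ [v] := by
  have h : PySem.List.pyIdx? (u.length + 1) (-1) = some u.length := by
    simp [PySem.List.pyIdx?]
  simp [PySem.List.pySetD, PySem.List.pySet?, h]

lemma succS_a : succS "a" = "b" := by decide

lemma incLoopA_allz (t : Nat) : ∀ (q f : Nat), 0 < t + q → t + 1 ≤ f →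
    incLoopA f (List.replicate t "z" ++ List.replicate q "a") ((t : Int) - 1)
      = List.replicate (t + q - 1) "a" ++ ["b"] := by
  induction t with
  | zero =>
    intro q f hq hf
    obtain ⟨f', rfl⟩ : ∃ f', f = f' + 1 := ⟨f - 1, by omega⟩
    rw [incLoopA]
    obtain ⟨q', rfl⟩ : ∃ q', q = q' + 1 := ⟨q - 1, by omega⟩
    have hrep : (List.replicate 0 "z" ++ List.replicate (q' + 1) "a")
        = List.replicate q' "a" ++ ["a"] := by
      simp [List.replicate_succ']
    rw [hrep]
    push_cast
    have hg : PySem.List.pyGet? (List.replicate q' "a" ++ ["a"]) (-1 : Int) = some "a" := by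
      exact PySem.List.pyGet?_neg_one_append_singleton (List.replicate q' "a") "a"
    rw [hg]
    simp only [ne_eq, if_pos (by decide : ¬ ("a" : String) = "z")]
    rw [pySetD_neg_one_append, succS_a]
    simp
  | succ t ih =>
    intro q f hq hf
    obtain ⟨f', rfl⟩ : ∃ f', f = f' + 1 := ⟨f - 1, by omega⟩
    rw [incLoopA]
    have hsplit : List.replicate (t + 1) "z" ++ List.replicate q "a"
        = List.replicate t "z" ++ "z" :: List.replicate q "a" := by
      simp [List.replicate_succ']
    have hidx : ((t + 1 : Nat) : Int) - 1 = ((List.replicate t "z").length : Int) := by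
      simp
    have hg : PySem.List.pyGet? (List.replicate (t + 1) "z" ++ List.replicate q "a")
        (((t + 1 : Nat) : Int) - 1) = some "z" := by
      rw [hsplit, hidx]
      exact_mod_cast PySem.List.pyGet?_append_length _ _ _
    push_cast at hg ⊢
    rw [hg]
    simp only [ne_eq, not_true_eq_false, if_false]
    have hset : PySem.List.pySetD (List.replicate (t + 1) "z" ++ List.replicate q "a")
        (((t : Int) + 1) - 1) "a"
        = List.replicate t "z" ++ List.replicate (q + 1) "a" := by
      have hidx' : ((t : Int) + 1) - 1 = ((List.replicate t "z").length : Int) := by simp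
      rw [hsplit, hidx', PySem.List.pySetD_natCast]
      have := set_append_len (List.replicate t "z") "z" "a" (List.replicate q "a")
      rw [this]
      simp [List.replicate_succ]
    rw [hset]
    have harg : (t : Int) + 1 - 1 - 1 = (t : Int) - 1 := by ring
    rw [harg, ih (q + 1) f' (by omega) (by omega)]
    have he : t + (q + 1) - 1 = t + 1 + q - 1 := by omega
    rw [he]

lemma pyGetD_append_len' (u : List String) (x : String) (v : List String) (d : String)
    (k : Nat) (hk : k = u.length) :
    PySem.List.pyGetD (u ++ x :: v) ((k : Nat) : Int) d = x := by
  subst hk; exact pyGetD_append_len u x v d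

lemma pySetD_append_len' (u : List String) (x y : String) (v : List String)
    (k : Nat) (hk : k = u.length) :
    PySem.List.pySetD (u ++ x :: v) ((k : Nat) : Int) y = u ++ y :: v := by
  subst hk; rw [PySem.List.pySetD_natCast, set_append_len]

lemma incLoopB_allz (t : Nat) : ∀ (q : Nat),
    incLoopB t (List.replicate t "z" ++ List.replicate q "a")
      = (List.replicate (t + q) "a", none) := by
  induction t with
  | zero => intro q; rw [incLoopB]; simp
  | succ t ih =>
    intro q
    rw [incLoopB]
    have hsplit : List.replicate (t + 1) "z" ++ List.replicate q "a"
        = List.replicate t "z" ++ "z" :: List.replicate q "a" := by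
      simp [List.replicate_succ']
    have hg : PySem.List.pyGetD (List.replicate (t + 1) "z" ++ List.replicate q "a")
        ((t : Nat) : Int) "" = "z" := by
      rw [hsplit]; exact pyGetD_append_len' _ _ _ _ t (by simp)
    rw [hg, if_pos rfl]
    have hset : PySem.List.pySetD (List.replicate (t + 1) "z" ++ List.replicate q "a")
        ((t : Nat) : Int) "a" = List.replicate t "z" ++ List.replicate (q + 1) "a" := by
      rw [hsplit, pySetD_append_len' _ _ _ _ t (by simp)]
      simp [List.replicate_succ]
    rw [hset, ih (q + 1)]
    have he : t + (q + 1) = t + 1 + q := by omega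
    rw [he]

lemma scanFixB_allA (n : Nat) :
    scanFixB (List.replicate n "a") = List.replicate n "a" := by
  induction n with
  | zero => rfl
  | succ n ih =>
    rw [List.replicate_succ, scanFixB, get?_bumpB]
    simp [ih]

lemma rev_decomp : ∀ (r : List String), (∃ s ∈ r, s ≠ "z") →
    ∃ (t : Nat) (c : String) (rest : List String),
      r = List.replicate t "z" ++ c :: rest ∧ c ≠ "z" := by
  intro r
  induction r with
  | nil => rintro ⟨s, hs, -⟩; cases hs
  | cons x r ih =>
    rintro ⟨s, hs, hsz⟩
    by_cases hx : x = "z"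
    · subst hx
      have hr : ∃ s ∈ r, s ≠ "z" := by
        rcases List.mem_cons.1 hs with h | h
        · exact absurd h.symm (by simpa [eq_comm] using hsz)
        · exact ⟨s, h, hsz⟩
      obtain ⟨t, c, rest, hr', hc⟩ := ih hr
      exact ⟨t + 1, c, rest, by rw [List.replicate_succ]; simp [hr'], hc⟩
    · exact ⟨0, x, r, by simp, hx⟩

lemma notmem_fin (s : String) (n : Nat) (hs : s ≠ "a") (hb : s ≠ "b") :
    s ∉ List.replicate n "a" ++ ["b"] := by
  simp only [List.mem_append, List.mem_cons, List.not_mem_nil, or_false, not_or]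
  exact ⟨mem_replicate_a s n hs, hb⟩

lemma getLast_ne (u : List String) (n : Nat) (hn : 0 < n) :
    u ++ ["b"] ≠ List.replicate n "a" := by
  intro h
  have h1 : (u ++ ["b"]).getLast? = some "b" := by simp
  have h2 : (List.replicate n "a").getLast? = some "a" := by
    obtain ⟨m, rfl⟩ : ∃ m, n = m + 1 := ⟨n - 1, by omega⟩
    rw [List.replicate_succ']
    simp
  rw [h] at h1
  rw [h1] at h2
  exact absurd (Option.some.inj h2) (by decide)

lemma decompose (pw : List String) (hne : pw ≠ [])
    (hd : ¬ D_IncrementPassword pw) :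
    ∃ (front : List String) (c : String) (t : Nat),
      pw = front ++ c :: List.replicate t "z" ∧ c ≠ "z" := by
  unfold D_IncrementPassword at hd
  have hex : ∃ s ∈ pw.reverse, s ≠ "z" := by
    rcases not_and_or.1 hd with h | h
    · exact absurd hne h
    · push_neg at h
      obtain ⟨s, hs, hsz⟩ := h
      exact ⟨s, List.mem_reverse.2 hs, hsz⟩
  obtain ⟨t, c, rest, hr, hc⟩ := rev_decomp pw.reverse hex
  refine ⟨rest.reverse, c, t, ?_, hc⟩
  have := congrArg List.reverse hr
  simpa [List.reverse_append] using this

lemma main_eq (pw : List String) (hne : pw ≠ [])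
    (hd : ¬ D_IncrementPassword pw) :
    IncrementPassword pw = IncrementPassword_alt pw := by
  obtain ⟨front, c, t, hpw, hc⟩ := decompose pw hne hd
  subst hpw
  have hq0 : front ++ c :: List.replicate t "z"
      = front ++ c :: (List.replicate t "z" ++ List.replicate 0 "a") := by simp
  -- A side
  have hlenA : PySem.List.len (front ++ c :: List.replicate t "z") - 1
      = ((front.length + t : Nat) : Int) := by
    simp [PySem.List.len_eq]
    push_cast; ring
  have hA : IncrementPassword (front ++ c :: List.replicate t "z")
      = passA "o" "p" (passA "l" "m" (passA "i" "j"
          (front ++ succS c :: List.replicate t "a"))) := by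
    unfold IncrementPassword
    rw [hlenA]
    rw [hq0, incLoopA_zblock t 0
          ((front ++ c :: (List.replicate t "z" ++ List.replicate 0 "a")).length + 1) front c hc
          (by simp; omega)]
    simp
  -- B side
  have hlenB : (front ++ c :: List.replicate t "z").length = front.length + 1 + t := by
    simp; omega
  have hB : IncrementPassword_alt (front ++ c :: List.replicate t "z")
      = scanFixB (front ++ succS c :: List.replicate t "a") := by
    unfold IncrementPassword_alt
    rw [hlenB, hq0, incLoopB_zblock t 0 front c hc]
    simp only
    rw [pyGetD_append_len' front c (List.replicate (t + 0) "a") "" front.length rfl,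
        pySetD_append_len' front c (succS c) (List.replicate (t + 0) "a") front.length rfl]
    simp
  rw [hA, hB, passes_eq_scan]

lemma A_allz (n : Nat) (hn : 0 < n) :
    IncrementPassword (List.replicate n "z") = List.replicate (n - 1) "a" ++ ["b"] := by
  unfold IncrementPassword
  have hrep : List.replicate n "z" = List.replicate n "z" ++ List.replicate 0 "a" := by simp
  have hlen : PySem.List.len (List.replicate n "z") - 1 = (n : Int) - 1 := by
    simp [PySem.List.len_eq]
  rw [hlen, hrep, incLoopA_allz n 0 ((List.replicate n "z" ++ List.replicate 0 "a").length + 1)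
        (by omega) (by simp)]
  simp only [Nat.add_zero]
  rw [passA_not_mem _ _ _ (notmem_fin "i" _ (by decide) (by decide)),
      passA_not_mem _ _ _ (notmem_fin "l" _ (by decide) (by decide)),
      passA_not_mem _ _ _ (notmem_fin "o" _ (by decide) (by decide))]

lemma B_allz (n : Nat) :
    IncrementPassword_alt (List.replicate n "z") = List.replicate n "a" := by
  unfold IncrementPassword_alt
  have hrep : List.replicate n "z" = List.replicate n "z" ++ List.replicate 0 "a" := by simp
  have hlen : (List.replicate n "z").length = n := by simp
  rw [hlen, hrep, incLoopB_allz n 0]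
  simp only [Nat.add_zero]
  rw [scanFixB_allA]

-- ===== VERDICT (by name: the statement is the Claim_ definition above) =====
theorem IncrementPassword_spec : Claim_unchanged_IncrementPassword := by
  intro pw _ hpre hd
  exact main_eq pw hpre.1 hd

theorem IncrementPassword_changed : Claim_changed_IncrementPassword := by
  unfold Claim_changed_IncrementPassword; decide

theorem IncrementPassword_tight : Claim_exact_IncrementPassword := by
  intro pw _ _ hD
  have hrep : pw = List.replicate pw.length "z" := List.eq_replicate_of_mem hD.2
  have hn : 0 < pw.length := List.length_pos_of_ne_nil hD.1
  rw [hrep, A_allz pw.length hn, B_allz pw.length]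
  exact getLast_ne _ _ hn
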